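-- pv_equiv track=rewrite | github.com/SaberSHO/AdventOfCode2023 | Day7/main.py | check_two_pairs
-- ===== SOURCE A (Python) =====
-- from collections import defaultdict
--
-- def subJoker(value_count):
--     if value_count['J'] > 0:
--         ##EDGE CASE OF NATURAL 5 OF A KIND OF J
--         if sorted(value_count.values()) == [5]:
--             return value_count
--         tempJ = value_count['J']
--         del value_count['J']
--         value_count[max(value_count,key=value_count.get)] += tempJ
--         return value_count
--     else:
--         del value_count['J']
--         return value_count
--
-- def check_two_pairs(hand):
--     values = [i[0] for i in hand]
--     value_counts = defaultdict(lambda:0)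
--     for v in values:
--         value_counts[v]+=1
--     value_counts = subJoker(value_counts)
--     if sorted(value_counts.values())==[1,2,2]:
--         return True
--     else:
--         return False
-- ===== SOURCE B (Python) =====
-- def check_two_pairs(hand):
--     # One pass: count jokers separately; a hand with any joker can never be
--     # two-pair (jokers only raise the top count), so jokers => False.
--     jokers = 0
--     counts = {}
--     for card in hand:
--         v = card[0]
--         if v == 'J':
--             jokers += 1
--         else:
--             counts[v] = counts.get(v, 0) + 1
--     if jokers > 0:
--         return False
--     return sorted(counts.values()) == [1, 2, 2]
-- ===== Notes on version B (the rewrite author's own statement) =====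
-- stated objective: simpler
-- what changed: B counts jokers and non-joker values in a single pass and returns False immediately when any joker is present (a joker only ever raises the top count, so a joker hand is never two-pair), dropping A's subJoker dict mutation, key deletion and max-key merge entirely; Pre_ only excludes inputs where A raises (an empty-string card -> IndexError, or a non-empty all-joker hand of length != 5 -> ValueError from max() of an empty dict).
import Mathlib
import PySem

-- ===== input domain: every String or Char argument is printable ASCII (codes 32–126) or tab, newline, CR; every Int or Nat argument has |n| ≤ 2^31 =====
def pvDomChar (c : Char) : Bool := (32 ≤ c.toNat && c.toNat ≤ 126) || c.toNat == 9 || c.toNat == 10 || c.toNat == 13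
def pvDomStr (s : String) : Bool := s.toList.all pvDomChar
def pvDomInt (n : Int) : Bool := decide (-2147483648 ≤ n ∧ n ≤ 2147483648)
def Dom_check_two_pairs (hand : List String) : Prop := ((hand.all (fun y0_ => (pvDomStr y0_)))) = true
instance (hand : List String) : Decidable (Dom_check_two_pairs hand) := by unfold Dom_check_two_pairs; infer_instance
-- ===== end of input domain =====

-- B drops A's subJoker merge/delete/max-key logic: one pass counting jokers and non-joker
-- values, returning False as soon as any joker is present (objective: simpler).

-- ===== PORT A =====
-- i[0] of a card string (exact for non-empty strings; empty strings are excluded by Pre_)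
def pvFirst (s : String) : Char := (PySem.Str.pyGet? s 0).getD ' '

-- subJoker(value_count); returns none where Python raises ValueError (max() of an empty dict)
def subJoker (d : PySem.Dict Char Int) : Option (PySem.Dict Char Int) :=
  -- reading value_count['J'] on a defaultdict inserts the default 0 for a missing key
  let d := if d.contains 'J' then d else d.insert 'J' 0
  if 0 < d.getD 'J' 0 then
    if PySem.List.sorted d.values (fun x => x) false = [5] then some d
    else
      let tempJ := d.getD 'J' 0
      let d2 := d.erase 'J'
      match PySem.List.max? d2.keys (fun k => d2.getD k 0) with
      | none => none
      | some m => some (d2.insert m (d2.getD m 0 + tempJ))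
  else some (d.erase 'J')

def check_two_pairs (hand : List String) : Bool :=
  let values := hand.map (fun i => pvFirst i)
  let value_counts := values.foldl (fun d v => d.insert v (d.getD v 0 + 1)) PySem.Dict.empty
  match subJoker value_counts with
  | none => false
  | some vc => if PySem.List.sorted vc.values (fun x => x) false = [1, 2, 2] then true else false

-- ===== PORT B =====
def check_two_pairs_alt (hand : List String) : Bool :=
  let st := hand.foldl
    (fun (st : Int × PySem.Dict Char Int) card =>
      let v := pvFirst card
      if v = 'J' then (st.1 + 1, st.2)
      else (st.1, st.2.insert v (st.2.getD v 0 + 1)))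
    (0, PySem.Dict.empty)
  if 0 < st.1 then false
  else decide (PySem.List.sorted st.2.values (fun x => x) false = [1, 2, 2])

-- ===== PRECONDITION & SPEC =====
-- Pre_ excludes exactly the inputs on which A raises: a hand containing an empty string
-- (IndexError on i[0]), and a non-empty hand of first chars all 'J' with length ≠ 5
-- (ValueError: max() of the empty dict left after deleting 'J').
def Pre_check_two_pairs (hand : List String) : Prop :=
  (∀ s ∈ hand, s ≠ "") ∧
  ¬ (hand ≠ [] ∧ hand.length ≠ 5 ∧ ∀ s ∈ hand, pvFirst s = 'J')
instance (hand : List String) : Decidable (Pre_check_two_pairs hand) := by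
  unfold Pre_check_two_pairs; infer_instance

def pvWitness_check_two_pairs : List String := ["2h", "2d", "3h", "3d", "Ks"]

def Spec_check_two_pairs (hand : List String) (out : Bool) : Prop := out = check_two_pairs_alt hand
instance (hand : List String) (out : Bool) : Decidable (Spec_check_two_pairs hand out) := by unfold Spec_check_two_pairs; infer_instance

-- ===== CLAIM (what is proved, stated in full; the proofs are below) =====
def Claim_equal_check_two_pairs : Prop := ∀ (hand : List String), Dom_check_two_pairs hand → Pre_check_two_pairs hand → Spec_check_two_pairs hand (check_two_pairs hand)

-- ===== LEMMAS AND PROOFS =====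

-- B's single pass = (joker count, counting fold over the non-joker values)
theorem alt_fold_eq (l : List String) (j : Int) (d : PySem.Dict Char Int) :
    l.foldl
      (fun (st : Int × PySem.Dict Char Int) card =>
        let v := pvFirst card
        if v = 'J' then (st.1 + 1, st.2)
        else (st.1, st.2.insert v (st.2.getD v 0 + 1)))
      (j, d)
    = (j + ((l.map pvFirst).count 'J' : Int),
       ((l.map pvFirst).filter (fun v => !(v == 'J'))).foldl
         (fun d v => d.insert v (d.getD v 0 + 1)) d) := by
  induction l generalizing j d with
  | nil => simp
  | cons c t ih =>
      by_cases h : pvFirst c = 'J' <;>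
        simp [ih, h, List.count_cons] <;> ring

theorem erase_insert_fresh (d : PySem.Dict Char Int) (k : Char) (v : Int)
    (h : d.contains k = false) : (d.insert k v).erase k = d := by
  apply PySem.Dict.ext
  have hk : ∀ p ∈ d.items, ¬ p.1 = k := by
    intro p hp hpk
    have : d.contains k = true := by
      simp [PySem.Dict.contains_iff_mem_keys, PySem.Dict.keys]
      exact ⟨p.2, by simpa [← hpk] using hp⟩
    simp [this] at h
  simp only [PySem.Dict.erase, PySem.Dict.insert, h, if_neg, Bool.false_eq_true,
    if_false, List.filter_append]
  rw [List.filter_eq_self.mpr (fun p hp => by simp [hk p hp])]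
  simp

-- the crux: after merging the jokers into the top count, the values can never sort to [1,2,2]
theorem merged_not_two_pairs (d2 : PySem.Dict Char Int) (m : Char) (tempJ : Int)
    (hnd : d2.keys.Nodup)
    (hm : m ∈ d2.keys)
    (hmax : ∀ k ∈ d2.keys, d2.getD k 0 ≤ d2.getD m 0)
    (hJ : 1 ≤ tempJ) :
    PySem.List.sorted (d2.insert m (d2.getD m 0 + tempJ)).values (fun x => x) false ≠ [1, 2, 2] := by
  intro hsort
  set vm := d2.getD m 0 with hvm
  set v' := vm + tempJ with hv'
  have hperm : (d2.insert m v').values.Perm [1, 2, 2] := by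
    have := PySem.List.sorted_perm (d2.insert m v').values (fun x => x) false
    rw [hsort] at this
    exact this.symm
  have hcont : d2.contains m = true := (PySem.Dict.contains_iff_mem_keys d2 m).mpr hm
  have hvals : (d2.insert m v').values
      = d2.items.map (fun p => if p.1 == m then v' else p.2) := by
    simp only [PySem.Dict.values, PySem.Dict.items_insert_of_contains d2 v' hcont,
      List.map_map]
    apply List.map_congr_left
    intro p _
    by_cases h : p.1 = m <;> simp [h]
  have hle : ∀ p ∈ d2.items, p.2 ≤ vm := by
    intro p hp
    have hk : p.1 ∈ d2.keys := by
      simp only [PySem.Dict.keys, List.mem_map]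
      exact ⟨p, hp, rfl⟩
    have := hmax p.1 hk
    rwa [PySem.Dict.getD_of_mem_items d2 (by exact hp) hnd 0] at this
  have hv'mem : v' ∈ (d2.insert m v').values := by
    obtain ⟨p, hp, hpm⟩ := List.mem_map.mp hm
    rw [hvals]
    exact List.mem_map.mpr ⟨p, hp, by simp [hpm]⟩
  have hle2 : v' ≤ 2 := by
    have h12 : v' = 1 ∨ v' = 2 := by simpa using hperm.mem_iff.mp hv'mem
    rcases h12 with h | h <;> omega
  have hvm1 : vm ≤ 1 := by omega
  have hc2 : (d2.insert m v').values.count 2 = 2 := by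
    rw [hperm.count_eq]
    decide
  have hcount : (d2.insert m v').values.count 2
      = List.countP (fun p => (if p.1 == m then v' else p.2) == 2) d2.items := by
    rw [hvals, List.count, List.countP_map]
    rfl
  have hmono : List.countP (fun p => (if p.1 == m then v' else p.2) == 2) d2.items
      ≤ List.countP (fun p => p.1 == m) d2.items := by
    apply List.countP_mono_left
    intro p hp h2
    by_cases h : (p.1 == m) = true
    · exact h
    · have hp2 : p.2 = 2 := by simpa [h] using h2
      have := hle p hp
      omega
  have hkeys : List.countP (fun p => p.1 == m) d2.items = d2.keys.count m := by
    simp only [PySem.Dict.keys, List.count, List.countP_map]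
    rfl
  have hone : d2.keys.count m ≤ 1 := List.nodup_iff_count_le_one.mp hnd m
  omega

-- ===== VERDICT =====
theorem check_two_pairs_spec : Claim_equal_check_two_pairs := by
  intro hand _ _
  unfold Spec_check_two_pairs check_two_pairs check_two_pairs_alt
  rw [alt_fold_eq]
  simp only [PySem.Dict.foldl_insert_getD_add_one_eq_counter]
  set values := hand.map pvFirst with hv
  by_cases hJ : 'J' ∈ values
  · -- jokers present: both sides are false
    have hcnt : 0 < (values.count 'J' : Int) := by
      have := List.count_pos_iff.mpr hJ
      omega
    have hcont : (PySem.Dict.counter values).contains 'J' = true := by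
      rw [PySem.Dict.contains_counter]
      exact List.elem_eq_true_of_mem hJ
    have hgetD : (PySem.Dict.counter values).getD 'J' 0 = (values.count 'J' : Int) :=
      PySem.Dict.getD_counter values 'J'
    simp only [hcont, zero_add, hcnt, if_pos]
    unfold subJoker
    simp only [hcont, hgetD, hcnt, if_pos]
    by_cases h5 : PySem.List.sorted (PySem.Dict.counter values).values (fun x => x) false = [5]
    · simp [h5]
    · simp only [h5, if_false]
      rcases hmx : PySem.List.max? ((PySem.Dict.counter values).erase 'J').keys
          (fun k => ((PySem.Dict.counter values).erase 'J').getD k 0) with _ | m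
      · rfl
      · have hnd : ((PySem.Dict.counter values).erase 'J').keys.Nodup := by
          have hsub : ((PySem.Dict.counter values).erase 'J').keys.Sublist
              (PySem.Dict.counter values).keys := by
            simp only [PySem.Dict.keys, PySem.Dict.erase]
            exact List.Sublist.map _ List.filter_sublist
          exact (PySem.Dict.nodup_keys_counter values).sublist hsub
        have := merged_not_two_pairs ((PySem.Dict.counter values).erase 'J') m
          ((values.count 'J' : Int)) hnd (PySem.List.max?_mem hmx)
          (PySem.List.max?_isMax hmx) (by omega)
        simp only [this, if_false]
  · -- no joker: both sides compare sorted counts with [1,2,2]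
    have hcnt : (values.count 'J' : Int) = 0 := by
      simp [List.count_eq_zero.mpr hJ]
    have hfilt : values.filter (fun v => !(v == 'J')) = values := by
      apply List.filter_eq_self.mpr
      intro a ha
      simp only [Bool.not_eq_eq_eq_not, Bool.not_true, beq_eq_false_iff_ne, ne_eq]
      intro h
      exact hJ (h ▸ ha)
    have hcont : (PySem.Dict.counter values).contains 'J' = false := by
      rw [PySem.Dict.contains_counter]
      simpa using hJ
    simp only [hcnt, hfilt, add_zero, lt_irrefl, if_false]
    unfold subJoker
    simp only [hcont, Bool.false_eq_true, if_false,
      PySem.Dict.getD_insert_self, lt_irrefl,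
      erase_insert_fresh _ _ _ hcont]
    by_cases h : PySem.List.sorted (PySem.Dict.counter values).values (fun x => x) false = [1, 2, 2] <;>
      simp [h]
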